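-- pv_equiv track=rewrite | github.com/shevchenkoira/shevchenko_practice | TASK1/main.py | cout_after_nnumber
-- ===== SOURCE A (Python) =====
-- def bigger_than(arr_to_check: [], num: int):
--     count = 0
--     for i in arr_to_check:
--         if num > i:
--             count += 1
--     return count
--
-- def cout_after_nnumber(our_values: [], a: int):
--     count_after = 0
--     for i in range(len(str(a))):
--         count_after += bigger_than(our_values, int(str(a)[i]))*(len(our_values)**(len(str(a))-i-1))
--         if not(int(str(a)[i]) in our_values):
--             break
--         if i == len(str(a)) - 1:
--             count_after = 1 if count_after == 0 else count_after
--
--     return count_after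
-- ===== SOURCE B (Python) =====
-- def cout_after_nnumber(our_values, a):
--     # One pass over our_values builds per-digit buckets; each digit of a is then
--     # handled by a table lookup instead of rescanning the whole list.
--     s = str(a)
--     n = len(our_values)
--     buckets = [0] * 11  # buckets[0]: values < 0; buckets[d+1]: values == d (0..9)
--     for v in our_values:
--         if v < 0:
--             buckets[0] += 1
--         elif v <= 9:
--             buckets[v + 1] += 1
--     less = []  # less[d] = number of values < d, for d in 0..9
--     acc = 0
--     for b in buckets[:10]:
--         acc += b
--         less.append(acc)
--     total = 0
--     L = len(s)
--     i = 0
--     for ch in s: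
--         d = int(ch)
--         total += less[d] * n ** (L - i - 1)
--         if buckets[d + 1] == 0:
--             break
--         i += 1
--     else:
--         if total == 0:
--             total = 1
--     return total
-- ===== Notes on version B (the rewrite author's own statement) =====
-- stated objective: alternative
-- what changed: B replaces A's per-digit rescan of our_values (bigger_than) with a single counting pass into 11 buckets plus prefix sums; each digit of a is then a table lookup.
import Mathlib
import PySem

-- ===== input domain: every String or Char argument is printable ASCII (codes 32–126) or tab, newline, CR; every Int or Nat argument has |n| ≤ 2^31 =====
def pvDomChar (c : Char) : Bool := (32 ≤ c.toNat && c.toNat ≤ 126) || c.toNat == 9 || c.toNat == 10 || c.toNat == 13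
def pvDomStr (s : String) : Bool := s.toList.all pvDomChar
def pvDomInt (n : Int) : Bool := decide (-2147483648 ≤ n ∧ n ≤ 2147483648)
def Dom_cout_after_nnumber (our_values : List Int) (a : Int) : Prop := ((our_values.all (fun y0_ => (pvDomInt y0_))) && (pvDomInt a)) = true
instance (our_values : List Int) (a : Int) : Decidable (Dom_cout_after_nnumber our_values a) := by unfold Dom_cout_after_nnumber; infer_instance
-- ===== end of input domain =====

-- B replaces A's per-digit rescan of our_values (bigger_than) by one counting pass into
-- buckets plus prefix sums; equivalence is claimed for a ≥ 0 (Pre_), since Python A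
-- raises ValueError on int('-') for negative a.

-- ===== PORT A =====
def bigger_than (arr_to_check : List Int) (num : Int) : Int :=
  arr_to_check.foldl (fun count i => if num > i then count + 1 else count) 0

-- int(str(a)[i]) for a single character: exact for digit characters '0'..'9',
-- which Pre_ (0 ≤ a) guarantees every character of str(a) is.
def pyDigit (c : Char) : Int := (c.toNat : Int) - 48

-- the 'for i in range(len(str(a)))' loop of A, with its break and last-index fixup
def aLoop (our_values : List Int) (rest : List Char) (i L count_after : Int) : Int :=
  match rest with
  | [] => count_after
  | c :: cs =>
    let d := pyDigit c
    -- exponent len(str(a))-i-1 is ≥ 0 while the loop runs, so .toNat is exact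
    let count_after := count_after + bigger_than our_values d * ((our_values.length : Int) ^ (L - i - 1).toNat)
    if ¬ (d ∈ our_values) then count_after
    else
      let count_after := if i = L - 1 then (if count_after = 0 then 1 else count_after) else count_after
      aLoop our_values cs (i + 1) L count_after

def cout_after_nnumber (our_values : List Int) (a : Int) : Int :=
  let s := PySem.Int.toChars a
  aLoop our_values s 0 (s.length : Int) 0

-- ===== PORT B =====
-- B's counting pass: buckets[0] counts values < 0, buckets[d+1] counts values == d (0 ≤ d ≤ 9)
def bStep (buckets : List Int) (v : Int) : List Int :=
  if v < 0 then buckets.set 0 (buckets.getD 0 0 + 1)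
  else if v ≤ 9 then buckets.set (v + 1).toNat (buckets.getD (v + 1).toNat 0 + 1)
  else buckets

-- B's digit loop with for/else: the [] case is Python's 'else' clause (no break)
def bLoop (n : Int) (less buckets : List Int) (rest : List Char) (i L total : Int) : Int :=
  match rest with
  | [] => if total = 0 then 1 else total
  | c :: cs =>
    let d := pyDigit c
    -- less[d] and buckets[d+1]: indices are in range (0 ≤ d ≤ 9 for digit chars, Pre_)
    let total := total + less.getD d.toNat 0 * (n ^ (L - i - 1).toNat)
    if buckets.getD (d + 1).toNat 0 = 0 then total
    else bLoop n less buckets cs (i + 1) L total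

def cout_after_nnumber_alt (our_values : List Int) (a : Int) : Int :=
  let s := PySem.Int.toChars a
  let n : Int := our_values.length
  let buckets := our_values.foldl bStep (List.replicate 11 0)
  let less := ((buckets.take 10).foldl (fun (p : List Int × Int) b => (p.1 ++ [p.2 + b], p.2 + b)) ([], 0)).1
  bLoop n less buckets s 0 (s.length : Int) 0

-- ===== PRECONDITION & SPEC =====
-- Pre_ excludes a < 0: there str(a)[0] = '-' and Python A raises ValueError at int('-').
def Pre_cout_after_nnumber (our_values : List Int) (a : Int) : Prop := 0 ≤ a
instance (our_values : List Int) (a : Int) : Decidable (Pre_cout_after_nnumber our_values a) := by unfold Pre_cout_after_nnumber; infer_instance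
def pvWitness_cout_after_nnumber : List Int × Int := ([1, 2, -3, 2], 21)

def Spec_cout_after_nnumber (our_values : List Int) (a : Int) (out : Int) : Prop := out = cout_after_nnumber_alt our_values a
instance (our_values : List Int) (a : Int) (out : Int) : Decidable (Spec_cout_after_nnumber our_values a out) := by unfold Spec_cout_after_nnumber; infer_instance

-- ===== CLAIM (what is proved, stated in full; the proofs are below) =====
def Claim_equal_cout_after_nnumber : Prop := ∀ (our_values : List Int) (a : Int), Dom_cout_after_nnumber our_values a → Pre_cout_after_nnumber our_values a → Spec_cout_after_nnumber our_values a (cout_after_nnumber our_values a)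

-- ===== LEMMAS AND PROOFS =====

lemma countP_lt_succ (vals : List Int) (k : Int) :
    vals.countP (fun v => decide (v < k + 1)) =
      vals.countP (fun v => decide (v < k)) + vals.count k := by
  induction vals with
  | nil => simp
  | cons v vs ih =>
    simp only [List.countP_cons, List.count_cons, ih]
    by_cases h1 : v < k + 1 <;> by_cases h2 : v < k <;> by_cases h3 : v = k <;>
      simp [h1, h2, h3] <;> omega

lemma countP_lt_eq (vals : List Int) (m : Nat) :
    (vals.countP (fun v => decide (v < (m : Int))) : Int) =
      (vals.countP (fun v => decide (v < 0)) : Int) +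
        ∑ k ∈ Finset.range m, ((vals.count ((k : Nat) : Int) : Nat) : Int) := by
  induction m with
  | zero => simp
  | succ m ih =>
    rw [Finset.sum_range_succ, show (((m + 1 : Nat)) : Int) = (m : Int) + 1 by push_cast; ring,
      countP_lt_succ vals (m : Int)]
    push_cast
    omega

lemma bigger_than_eq (vals : List Int) (d : Int) :
    bigger_than vals d = (vals.countP (fun v => decide (v < d)) : Int) := by
  unfold bigger_than
  rw [PySem.List.foldl_ite_add_one]
  simp

lemma buckets_closed (vals : List Int) :
    vals.foldl bStep (List.replicate 11 0) =
      [((vals.countP (fun v => decide (v < 0)) : Nat) : Int),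
       ((vals.count 0 : Nat) : Int), ((vals.count 1 : Nat) : Int), ((vals.count 2 : Nat) : Int),
       ((vals.count 3 : Nat) : Int), ((vals.count 4 : Nat) : Int), ((vals.count 5 : Nat) : Int),
       ((vals.count 6 : Nat) : Int), ((vals.count 7 : Nat) : Int), ((vals.count 8 : Nat) : Int),
       ((vals.count 9 : Nat) : Int)] := by
  induction vals using List.reverseRecOn with
  | nil => simp [List.replicate]
  | append_singleton vs v ih =>
    rw [List.foldl_append, List.foldl_cons, List.foldl_nil, ih]
    by_cases h0 : v < 0
    · simp [bStep, h0, List.count_append, List.countP_append, List.count_singleton,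
        List.set]
      push_cast
      omega
    · by_cases h9 : v ≤ 9
      · interval_cases v <;>
          simp [bStep, List.count_append, List.countP_append,
            List.countP_singleton, List.set] <;> push_cast <;> omega
      · simp [bStep, h0, h9, List.count_append, List.countP_append,
          List.count_singleton]
        push_cast
        omega

lemma digitChar_range (m : Nat) (hm : m < 10) :
    48 ≤ (Nat.digitChar m).toNat ∧ (Nat.digitChar m).toNat ≤ 57 := by
  interval_cases m <;> decide

lemma toDigitsCore_digits (f : Nat) : ∀ (n : Nat) (acc : List Char),
    ∀ c ∈ Nat.toDigitsCore 10 f n acc,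
      c ∈ acc ∨ (48 ≤ c.toNat ∧ c.toNat ≤ 57) := by
  induction f with
  | zero => intro n acc c hc; exact Or.inl hc
  | succ f ih =>
    intro n acc c hc
    simp only [Nat.toDigitsCore] at hc
    by_cases h : n / 10 = 0
    · rw [if_pos h] at hc
      rcases List.mem_cons.mp hc with h1 | h1
      · exact Or.inr (h1 ▸ digitChar_range _ (Nat.mod_lt _ (by norm_num)))
      · exact Or.inl h1
    · rw [if_neg h] at hc
      rcases ih (n / 10) _ c hc with h1 | h1
      · rcases List.mem_cons.mp h1 with h2 | h2
        · exact Or.inr (h2 ▸ digitChar_range _ (Nat.mod_lt _ (by norm_num)))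
        · exact Or.inl h2
      · exact Or.inr h1

lemma digits_of_toChars (a : Int) (ha : 0 ≤ a) :
    ∀ c ∈ PySem.Int.toChars a, 48 ≤ c.toNat ∧ c.toNat ≤ 57 := by
  intro c hc
  rw [PySem.Int.toChars, if_neg (by omega)] at hc
  rcases toDigitsCore_digits _ _ _ c hc with h | h
  · simp at h
  · exact h

lemma toDigitsCore_ne_nil (f : Nat) : ∀ (n : Nat) (acc : List Char),
    acc ≠ [] ∨ 0 < f → Nat.toDigitsCore 10 f n acc ≠ [] := by
  induction f with
  | zero =>
    intro n acc h
    rcases h with h | h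
    · simpa [Nat.toDigitsCore] using h
    · omega
  | succ f ih =>
    intro n acc _
    simp only [Nat.toDigitsCore]
    by_cases h : n / 10 = 0
    · simp [h]
    · rw [if_neg h]
      exact ih _ _ (Or.inl (by simp))

lemma toChars_ne_nil (a : Int) : PySem.Int.toChars a ≠ [] := by
  rw [PySem.Int.toChars]
  by_cases h : a < 0
  · simp [h]
  · rw [if_neg h]
    exact toDigitsCore_ne_nil _ _ _ (Or.inr (by omega))

lemma less_getD (vals : List Int) (d : Int) (h0 : 0 ≤ d) (h9 : d ≤ 9) :
    ((((vals.foldl bStep (List.replicate 11 0)).take 10).foldl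
        (fun (p : List Int × Int) b => (p.1 ++ [p.2 + b], p.2 + b)) ([], 0)).1).getD d.toNat 0 =
      bigger_than vals d := by
  rw [buckets_closed, bigger_than_eq]
  interval_cases d <;>
  · simp only [List.take, List.foldl, List.nil_append, List.cons_append, List.getD, Int.toNat,
      List.getElem?_cons_zero, List.getElem?_cons_succ, Option.getD_some]
    have hA := countP_lt_eq vals 0
    have hB := countP_lt_eq vals 1
    have hC := countP_lt_eq vals 2
    have hD := countP_lt_eq vals 3
    have hE := countP_lt_eq vals 4
    have hF := countP_lt_eq vals 5
    have hG := countP_lt_eq vals 6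
    have hH := countP_lt_eq vals 7
    have hI := countP_lt_eq vals 8
    have hJ := countP_lt_eq vals 9
    norm_num [Finset.sum_range_succ] at hA hB hC hD hE hF hG hH hI hJ ⊢ <;>
    omega

lemma buckets_getD (vals : List Int) (d : Int) (h0 : 0 ≤ d) (h9 : d ≤ 9) :
    ((vals.foldl bStep (List.replicate 11 0)).getD (d + 1).toNat 0 = 0) ↔ ¬ d ∈ vals := by
  rw [buckets_closed]
  interval_cases d <;>
    simp [List.getD, List.count_eq_zero]

lemma loop_eq (vals : List Int) (rest : List Char) (i L count : Int)
    (hd : ∀ c ∈ rest, 48 ≤ c.toNat ∧ c.toNat ≤ 57)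
    (hne : rest ≠ [])
    (hiL : i + rest.length = L) :
    aLoop vals rest i L count =
      bLoop (vals.length : Int)
        ((((vals.foldl bStep (List.replicate 11 0)).take 10).foldl
            (fun (p : List Int × Int) b => (p.1 ++ [p.2 + b], p.2 + b)) ([], 0)).1)
        (vals.foldl bStep (List.replicate 11 0)) rest i L count := by
  induction rest generalizing i count with
  | nil => exact absurd rfl hne
  | cons c cs ih =>
    have hc := hd c List.mem_cons_self
    have hdig0 : (0:Int) ≤ pyDigit c := by unfold pyDigit; omega
    have hdig9 : pyDigit c ≤ 9 := by unfold pyDigit; omega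
    have hbc := buckets_getD vals (pyDigit c) hdig0 hdig9
    simp only [aLoop, bLoop]
    rw [less_getD vals _ hdig0 hdig9]
    by_cases hmem : pyDigit c ∈ vals
    · rw [if_neg (not_not_intro hmem), if_neg (fun h => (hbc.mp h) hmem)]
      cases cs with
      | nil =>
        have hiL1 : i = L - 1 := by simp at hiL; omega
        rw [if_pos hiL1]
        simp only [aLoop, bLoop]
      | cons c2 cs2 =>
        have hiL1 : ¬ (i = L - 1) := by simp at hiL; omega
        rw [if_neg hiL1]
        exact ih (i + 1) _ (fun x hx => hd x (List.mem_cons_of_mem _ hx))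
          (by simp) (by simp at hiL ⊢; omega)
    · rw [if_pos hmem, if_pos (hbc.mpr hmem)]

-- ===== VERDICT (by name: the statement is the Claim_ definition above) =====
theorem cout_after_nnumber_spec : Claim_equal_cout_after_nnumber := by
  intro vals a _ hpre
  unfold Spec_cout_after_nnumber cout_after_nnumber cout_after_nnumber_alt
  exact loop_eq vals (PySem.Int.toChars a) 0 _ 0 (digits_of_toChars a hpre) (toChars_ne_nil a) (by simp)
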